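-- pv_equiv track=rewrite | github.com/mcdgit29/CancerUtils | CancerUtils/text.py | detect_any_negation
-- ===== SOURCE A (Python) =====
-- def _pre_processor(s):
--     results = str(s)\
--         .lower()\
--         .replace('  ', ' ')\
--         .strip()
--     return  ' ' + results
--
-- def detect_any_negation(s):
--     s = _pre_processor(s)\
--         .replace('receptor neg' , ' ')\
--         .replace('without complication', ' ')
--
--     keywords = ['negative', 'hx neg', 'hx_neg', 'no history', 'no family history', 'no fh', 'no f/m', 'no ho ', 'no h/o', 'does not', 'is not', "doesn't",
--                 "isn't", "no known", "is unknown"]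
--     results = any([s.lower().__contains__(word) for word in keywords])
--     return results
-- ===== SOURCE B (Python) =====
-- KEYWORDS = tuple(
--     "negative|hx neg|hx_neg|no history|no family history|no fh|no f/m|no ho |no h/o|does not|is not|doesn't|isn't|no known|is unknown".split('|')
-- )
--
-- def detect_any_negation(s):
--     t = ' ' + str(s).lower().replace('  ', ' ').strip()
--     t = t.replace('receptor neg', ' ').replace('without complication', ' ').lower()
--     return any(t.startswith(KEYWORDS, i) for i in range(len(t)))
-- ===== Notes on version B (the rewrite author's own statement) =====
-- stated objective: alternative
-- what changed: The per-keyword substring searches (s contains w for each of the 15 keywords) are replaced by a single left-to-right scan over the string's positions testing all keywords at once via t.startswith(KEYWORDS, i), with the redundant per-iteration .lower() hoisted out of the loop.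
import Mathlib
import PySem

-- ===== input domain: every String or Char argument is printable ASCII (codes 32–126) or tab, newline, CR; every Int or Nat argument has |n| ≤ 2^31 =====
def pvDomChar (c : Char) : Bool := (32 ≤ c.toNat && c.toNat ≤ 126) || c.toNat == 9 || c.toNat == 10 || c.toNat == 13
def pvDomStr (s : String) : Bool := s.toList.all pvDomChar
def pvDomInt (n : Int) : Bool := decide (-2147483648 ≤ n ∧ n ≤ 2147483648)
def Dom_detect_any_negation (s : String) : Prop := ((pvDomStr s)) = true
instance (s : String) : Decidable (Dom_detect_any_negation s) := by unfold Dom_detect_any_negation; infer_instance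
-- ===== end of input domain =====

-- B replaces A's per-keyword substring searches by a single left-to-right scan over the
-- string's positions, testing all keywords at each position (objective: alternative).
-- Python 'str(s)' on a str argument is the identity and is omitted in both ports.

-- ===== PORT A =====
-- _pre_processor: lower, collapse '  ' once, strip, prepend ' ' (concat of the single
-- space ported exactly as a cons on the char list)
def pvPreProcessor (s : String) : List Char :=
  ' ' :: PySem.Chars.strip (PySem.Chars.replace (PySem.Chars.lower s.toList) "  ".toList " ".toList)

def pvKeywordsA : List (List Char) :=
  ["negative".toList, "hx neg".toList, "hx_neg".toList, "no history".toList,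
   "no family history".toList, "no fh".toList, "no f/m".toList, "no ho ".toList,
   "no h/o".toList, "does not".toList, "is not".toList, "doesn't".toList,
   "isn't".toList, "no known".toList, "is unknown".toList]

def detect_any_negation (s : String) : Bool :=
  let t := PySem.Chars.replace
             (PySem.Chars.replace (pvPreProcessor s) "receptor neg".toList " ".toList)
             "without complication".toList " ".toList
  pvKeywordsA.any (fun word => PySem.Chars.isIn word (PySem.Chars.lower t))

-- ===== PORT B =====
def pvKeywordsB : List (List Char) :=
  (PySem.Chars.splitOn "negative|hx neg|hx_neg|no history|no family history|no fh|no f/m|no ho |no h/o|does not|is not|doesn't|isn't|no known|is unknown".toList "|".toList)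

-- 'any(t.startswith(KEYWORDS, i) for i in range(len(t)))': one pass over the positions of t
def pvScanB (kws : List (List Char)) : List Char → Bool
  | [] => false
  | c :: rest => kws.any (fun w => PySem.Chars.startswith (c :: rest) w) || pvScanB kws rest

def detect_any_negation_alt (s : String) : Bool :=
  let t0 := ' ' :: PySem.Chars.strip (PySem.Chars.replace (PySem.Chars.lower s.toList) "  ".toList " ".toList)
  let t := PySem.Chars.lower
             (PySem.Chars.replace
               (PySem.Chars.replace t0 "receptor neg".toList " ".toList)
               "without complication".toList " ".toList)
  pvScanB pvKeywordsB t

-- ===== PRECONDITION & SPEC =====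
def Spec_detect_any_negation (s : String) (out : Bool) : Prop := out = detect_any_negation_alt s
instance (s : String) (out : Bool) : Decidable (Spec_detect_any_negation s out) := by unfold Spec_detect_any_negation; infer_instance

-- ===== CLAIM (what is proved, stated in full; the proofs are below) =====
def Claim_equal_detect_any_negation : Prop := ∀ (s : String), Dom_detect_any_negation s → Spec_detect_any_negation s (detect_any_negation s)

-- ===== LEMMAS AND PROOFS =====

set_option maxRecDepth 8192 in
lemma pvKeywordsB_eq : pvKeywordsB = pvKeywordsA := by decide

lemma pvKeywordsA_ne_nil : ∀ w ∈ pvKeywordsA, w ≠ [] := by decide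

-- the position scan finds exactly the keywords that occur as a prefix of some suffix
lemma pvScanB_iff (kws : List (List Char)) (h : ∀ w ∈ kws, w ≠ []) (cs : List Char) :
    pvScanB kws cs = true ↔ ∃ w ∈ kws, ∃ j, w <+: cs.drop j := by
  induction cs with
  | nil =>
    refine ⟨fun hx => by simp [pvScanB] at hx, ?_⟩
    rintro ⟨w, hw, j, hp⟩
    rw [List.drop_nil, List.prefix_nil] at hp
    exact absurd hp (h w hw)
  | cons c rest ih =>
    simp only [pvScanB, Bool.or_eq_true, List.any_eq_true, ih]
    constructor
    · rintro (⟨w, hw, hs⟩ | ⟨w, hw, j, hp⟩)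
      · exact ⟨w, hw, 0, by simpa [PySem.Chars.startswith_iff] using hs⟩
      · exact ⟨w, hw, j + 1, by simpa using hp⟩
    · rintro ⟨w, hw, j, hp⟩
      cases j with
      | zero => exact Or.inl ⟨w, hw, by simpa [PySem.Chars.startswith_iff] using hp⟩
      | succ j => exact Or.inr ⟨w, hw, j, by simpa using hp⟩

-- ===== VERDICT (by name: the statement is the Claim_ definition above) =====
theorem detect_any_negation_spec : Claim_equal_detect_any_negation := by
  intro s _
  unfold Spec_detect_any_negation detect_any_negation detect_any_negation_alt pvPreProcessor
  rw [pvKeywordsB_eq, Bool.eq_iff_iff, pvScanB_iff pvKeywordsA pvKeywordsA_ne_nil,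
      List.any_eq_true]
  constructor
  · rintro ⟨w, hw, hin⟩
    obtain ⟨j, hp⟩ := (PySem.Chars.exists_prefix_drop_iff_isIn _ _).mpr hin
    exact ⟨w, hw, j, hp⟩
  · rintro ⟨w, hw, j, hp⟩
    exact ⟨w, hw, (PySem.Chars.exists_prefix_drop_iff_isIn _ _).mp ⟨j, hp⟩⟩
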